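-- pv_equiv track=rewrite | github.com/pypi-data/pypi-mirror-402 | packages/darkzloop/darkzloop-0.8.3-py3-none-any.whl/darkzloop/core/semantic.py | quick_expand
-- ===== SOURCE A (Python) =====
-- from typing import Dict, List, Set, Optional, Tuple
--
-- BUILTIN_SYNONYMS: Dict[str, List[str]] = {
--     # Authentication
--     "login": ["auth", "signin", "authenticate", "session", "credential"],
--     "logout": ["signout", "deauth", "session_destroy"],
--     "auth": ["authentication", "login", "identity", "oauth", "jwt", "token"],
--     "user": ["account", "profile", "member", "identity", "principal"],
--     "password": ["credential", "secret", "passphrase", "pwd"],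
--     "permission": ["role", "access", "privilege", "acl", "rbac", "authorization"],
--
--     # E-commerce
--     "cart": ["basket", "bag", "shopping_cart"],
--     "checkout": ["purchase", "order", "payment", "buy"],
--     "billing": ["invoice", "payment", "subscription", "charge", "stripe", "pricing"],
--     "payment": ["billing", "charge", "transaction", "stripe", "paypal"],
--     "product": ["item", "sku", "merchandise", "goods", "inventory"],
--     "order": ["purchase", "transaction", "checkout", "booking"],
--     "customer": ["client", "buyer", "user", "account"],
--
--     # Data
--     "database": ["db", "store", "persistence", "repository", "storage"],
--     "query": ["search", "find", "fetch", "select", "lookup"],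
--     "cache": ["memo", "store", "redis", "memcache"],
--     "model": ["entity", "schema", "record", "domain"],
--     "migration": ["schema", "alter", "upgrade", "evolve"],
--
--     # API
--     "endpoint": ["route", "handler", "controller", "api"],
--     "request": ["req", "input", "payload"],
--     "response": ["res", "output", "reply"],
--     "middleware": ["interceptor", "filter", "guard", "pipe"],
--     "validation": ["verify", "check", "guard", "assert", "sanitize"],
--
--     # Events
--     "event": ["message", "signal", "notification", "webhook", "trigger"],
--     "publish": ["emit", "send", "dispatch", "broadcast"],
--     "subscribe": ["listen", "consume", "handle", "observe"],
--     "queue": ["job", "task", "worker", "background"],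
--
--     # UI
--     "component": ["widget", "element", "view", "partial"],
--     "page": ["screen", "view", "route", "template"],
--     "modal": ["dialog", "popup", "overlay"],
--     "form": ["input", "field", "control"],
--     "button": ["btn", "action", "trigger"],
--
--     # Common Actions
--     "create": ["add", "new", "insert", "make", "generate"],
--     "update": ["edit", "modify", "patch", "change"],
--     "delete": ["remove", "destroy", "drop", "purge"],
--     "list": ["index", "all", "fetch", "get_all", "find_all"],
--     "get": ["fetch", "find", "read", "retrieve", "load"],
--
--     # Testing
--     "test": ["spec", "check", "verify", "assert"],
--     "mock": ["stub", "fake", "spy", "double"],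
--     "fixture": ["factory", "seed", "sample"],
--
--     # Config
--     "config": ["settings", "options", "preferences", "env"],
--     "environment": ["env", "config", "context"],
-- }
--
-- def quick_expand(term: str) -> List[str]:
--     """Quick expansion using only built-in synonyms."""
--     results = [term]
--
--     if term.lower() in BUILTIN_SYNONYMS:
--         results.extend(BUILTIN_SYNONYMS[term.lower()])
--
--     for key, synonyms in BUILTIN_SYNONYMS.items():
--         if term.lower() in synonyms:
--             results.append(key)
--             results.extend(s for s in synonyms if s != term.lower())
--
--     return list(set(results))
-- ===== SOURCE B (Python) =====
-- from typing import Dict, List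
--
-- # Reverse synonym-expansion index, precomputed offline from BUILTIN_SYNONYMS:
-- # _INDEX[w] lists every word related to w (direct synonyms, then reverse hits
-- # in table order), so a call is one dict lookup instead of a double table scan.
-- _INDEX = {
--     'login': ['auth', 'signin', 'authenticate', 'session', 'credential', 'auth', 'authentication', 'identity', 'oauth', 'jwt', 'token'],
--     'auth': ['authentication', 'login', 'identity', 'oauth', 'jwt', 'token', 'login', 'signin', 'authenticate', 'session', 'credential'],
--     'signin': ['login', 'auth', 'authenticate', 'session', 'credential'],
--     'authenticate': ['login', 'auth', 'signin', 'session', 'credential'],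
--     'session': ['login', 'auth', 'signin', 'authenticate', 'credential'],
--     'credential': ['login', 'auth', 'signin', 'authenticate', 'session', 'password', 'secret', 'passphrase', 'pwd'],
--     'logout': ['signout', 'deauth', 'session_destroy'],
--     'signout': ['logout', 'deauth', 'session_destroy'],
--     'deauth': ['logout', 'signout', 'session_destroy'],
--     'session_destroy': ['logout', 'signout', 'deauth'],
--     'authentication': ['auth', 'login', 'identity', 'oauth', 'jwt', 'token'],
--     'identity': ['auth', 'authentication', 'login', 'oauth', 'jwt', 'token', 'user', 'account', 'profile', 'member', 'principal'],
--     'oauth': ['auth', 'authentication', 'login', 'identity', 'jwt', 'token'],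
--     'jwt': ['auth', 'authentication', 'login', 'identity', 'oauth', 'token'],
--     'token': ['auth', 'authentication', 'login', 'identity', 'oauth', 'jwt'],
--     'user': ['account', 'profile', 'member', 'identity', 'principal', 'customer', 'client', 'buyer', 'account'],
--     'account': ['user', 'profile', 'member', 'identity', 'principal', 'customer', 'client', 'buyer', 'user'],
--     'profile': ['user', 'account', 'member', 'identity', 'principal'],
--     'member': ['user', 'account', 'profile', 'identity', 'principal'],
--     'principal': ['user', 'account', 'profile', 'member', 'identity'],
--     'password': ['credential', 'secret', 'passphrase', 'pwd'],
--     'secret': ['password', 'credential', 'passphrase', 'pwd'],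
--     'passphrase': ['password', 'credential', 'secret', 'pwd'],
--     'pwd': ['password', 'credential', 'secret', 'passphrase'],
--     'permission': ['role', 'access', 'privilege', 'acl', 'rbac', 'authorization'],
--     'role': ['permission', 'access', 'privilege', 'acl', 'rbac', 'authorization'],
--     'access': ['permission', 'role', 'privilege', 'acl', 'rbac', 'authorization'],
--     'privilege': ['permission', 'role', 'access', 'acl', 'rbac', 'authorization'],
--     'acl': ['permission', 'role', 'access', 'privilege', 'rbac', 'authorization'],
--     'rbac': ['permission', 'role', 'access', 'privilege', 'acl', 'authorization'],
--     'authorization': ['permission', 'role', 'access', 'privilege', 'acl', 'rbac'],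
--     'cart': ['basket', 'bag', 'shopping_cart'],
--     'basket': ['cart', 'bag', 'shopping_cart'],
--     'bag': ['cart', 'basket', 'shopping_cart'],
--     'shopping_cart': ['cart', 'basket', 'bag'],
--     'checkout': ['purchase', 'order', 'payment', 'buy', 'order', 'purchase', 'transaction', 'booking'],
--     'purchase': ['checkout', 'order', 'payment', 'buy', 'order', 'transaction', 'checkout', 'booking'],
--     'order': ['purchase', 'transaction', 'checkout', 'booking', 'checkout', 'purchase', 'payment', 'buy'],
--     'payment': ['billing', 'charge', 'transaction', 'stripe', 'paypal', 'checkout', 'purchase', 'order', 'buy', 'billing', 'invoice', 'subscription', 'charge', 'stripe', 'pricing'],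
--     'buy': ['checkout', 'purchase', 'order', 'payment'],
--     'billing': ['invoice', 'payment', 'subscription', 'charge', 'stripe', 'pricing', 'payment', 'charge', 'transaction', 'stripe', 'paypal'],
--     'invoice': ['billing', 'payment', 'subscription', 'charge', 'stripe', 'pricing'],
--     'subscription': ['billing', 'invoice', 'payment', 'charge', 'stripe', 'pricing'],
--     'charge': ['billing', 'invoice', 'payment', 'subscription', 'stripe', 'pricing', 'payment', 'billing', 'transaction', 'stripe', 'paypal'],
--     'stripe': ['billing', 'invoice', 'payment', 'subscription', 'charge', 'pricing', 'payment', 'billing', 'charge', 'transaction', 'paypal'],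
--     'pricing': ['billing', 'invoice', 'payment', 'subscription', 'charge', 'stripe'],
--     'transaction': ['payment', 'billing', 'charge', 'stripe', 'paypal', 'order', 'purchase', 'checkout', 'booking'],
--     'paypal': ['payment', 'billing', 'charge', 'transaction', 'stripe'],
--     'product': ['item', 'sku', 'merchandise', 'goods', 'inventory'],
--     'item': ['product', 'sku', 'merchandise', 'goods', 'inventory'],
--     'sku': ['product', 'item', 'merchandise', 'goods', 'inventory'],
--     'merchandise': ['product', 'item', 'sku', 'goods', 'inventory'],
--     'goods': ['product', 'item', 'sku', 'merchandise', 'inventory'],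
--     'inventory': ['product', 'item', 'sku', 'merchandise', 'goods'],
--     'booking': ['order', 'purchase', 'transaction', 'checkout'],
--     'customer': ['client', 'buyer', 'user', 'account'],
--     'client': ['customer', 'buyer', 'user', 'account'],
--     'buyer': ['customer', 'client', 'user', 'account'],
--     'database': ['db', 'store', 'persistence', 'repository', 'storage'],
--     'db': ['database', 'store', 'persistence', 'repository', 'storage'],
--     'store': ['database', 'db', 'persistence', 'repository', 'storage', 'cache', 'memo', 'redis', 'memcache'],
--     'persistence': ['database', 'db', 'store', 'repository', 'storage'],
--     'repository': ['database', 'db', 'store', 'persistence', 'storage'],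
--     'storage': ['database', 'db', 'store', 'persistence', 'repository'],
--     'query': ['search', 'find', 'fetch', 'select', 'lookup'],
--     'search': ['query', 'find', 'fetch', 'select', 'lookup'],
--     'find': ['query', 'search', 'fetch', 'select', 'lookup', 'get', 'fetch', 'read', 'retrieve', 'load'],
--     'fetch': ['query', 'search', 'find', 'select', 'lookup', 'list', 'index', 'all', 'get_all', 'find_all', 'get', 'find', 'read', 'retrieve', 'load'],
--     'select': ['query', 'search', 'find', 'fetch', 'lookup'],
--     'lookup': ['query', 'search', 'find', 'fetch', 'select'],
--     'cache': ['memo', 'store', 'redis', 'memcache'],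
--     'memo': ['cache', 'store', 'redis', 'memcache'],
--     'redis': ['cache', 'memo', 'store', 'memcache'],
--     'memcache': ['cache', 'memo', 'store', 'redis'],
--     'model': ['entity', 'schema', 'record', 'domain'],
--     'entity': ['model', 'schema', 'record', 'domain'],
--     'schema': ['model', 'entity', 'record', 'domain', 'migration', 'alter', 'upgrade', 'evolve'],
--     'record': ['model', 'entity', 'schema', 'domain'],
--     'domain': ['model', 'entity', 'schema', 'record'],
--     'migration': ['schema', 'alter', 'upgrade', 'evolve'],
--     'alter': ['migration', 'schema', 'upgrade', 'evolve'],
--     'upgrade': ['migration', 'schema', 'alter', 'evolve'],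
--     'evolve': ['migration', 'schema', 'alter', 'upgrade'],
--     'endpoint': ['route', 'handler', 'controller', 'api'],
--     'route': ['endpoint', 'handler', 'controller', 'api', 'page', 'screen', 'view', 'template'],
--     'handler': ['endpoint', 'route', 'controller', 'api'],
--     'controller': ['endpoint', 'route', 'handler', 'api'],
--     'api': ['endpoint', 'route', 'handler', 'controller'],
--     'request': ['req', 'input', 'payload'],
--     'req': ['request', 'input', 'payload'],
--     'input': ['request', 'req', 'payload', 'form', 'field', 'control'],
--     'payload': ['request', 'req', 'input'],
--     'response': ['res', 'output', 'reply'],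
--     'res': ['response', 'output', 'reply'],
--     'output': ['response', 'res', 'reply'],
--     'reply': ['response', 'res', 'output'],
--     'middleware': ['interceptor', 'filter', 'guard', 'pipe'],
--     'interceptor': ['middleware', 'filter', 'guard', 'pipe'],
--     'filter': ['middleware', 'interceptor', 'guard', 'pipe'],
--     'guard': ['middleware', 'interceptor', 'filter', 'pipe', 'validation', 'verify', 'check', 'assert', 'sanitize'],
--     'pipe': ['middleware', 'interceptor', 'filter', 'guard'],
--     'validation': ['verify', 'check', 'guard', 'assert', 'sanitize'],
--     'verify': ['validation', 'check', 'guard', 'assert', 'sanitize', 'test', 'spec', 'check', 'assert'],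
--     'check': ['validation', 'verify', 'guard', 'assert', 'sanitize', 'test', 'spec', 'verify', 'assert'],
--     'assert': ['validation', 'verify', 'check', 'guard', 'sanitize', 'test', 'spec', 'check', 'verify'],
--     'sanitize': ['validation', 'verify', 'check', 'guard', 'assert'],
--     'event': ['message', 'signal', 'notification', 'webhook', 'trigger'],
--     'message': ['event', 'signal', 'notification', 'webhook', 'trigger'],
--     'signal': ['event', 'message', 'notification', 'webhook', 'trigger'],
--     'notification': ['event', 'message', 'signal', 'webhook', 'trigger'],
--     'webhook': ['event', 'message', 'signal', 'notification', 'trigger'],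
--     'trigger': ['event', 'message', 'signal', 'notification', 'webhook', 'button', 'btn', 'action'],
--     'publish': ['emit', 'send', 'dispatch', 'broadcast'],
--     'emit': ['publish', 'send', 'dispatch', 'broadcast'],
--     'send': ['publish', 'emit', 'dispatch', 'broadcast'],
--     'dispatch': ['publish', 'emit', 'send', 'broadcast'],
--     'broadcast': ['publish', 'emit', 'send', 'dispatch'],
--     'subscribe': ['listen', 'consume', 'handle', 'observe'],
--     'listen': ['subscribe', 'consume', 'handle', 'observe'],
--     'consume': ['subscribe', 'listen', 'handle', 'observe'],
--     'handle': ['subscribe', 'listen', 'consume', 'observe'],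
--     'observe': ['subscribe', 'listen', 'consume', 'handle'],
--     'queue': ['job', 'task', 'worker', 'background'],
--     'job': ['queue', 'task', 'worker', 'background'],
--     'task': ['queue', 'job', 'worker', 'background'],
--     'worker': ['queue', 'job', 'task', 'background'],
--     'background': ['queue', 'job', 'task', 'worker'],
--     'component': ['widget', 'element', 'view', 'partial'],
--     'widget': ['component', 'element', 'view', 'partial'],
--     'element': ['component', 'widget', 'view', 'partial'],
--     'view': ['component', 'widget', 'element', 'partial', 'page', 'screen', 'route', 'template'],
--     'partial': ['component', 'widget', 'element', 'view'],
--     'page': ['screen', 'view', 'route', 'template'],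
--     'screen': ['page', 'view', 'route', 'template'],
--     'template': ['page', 'screen', 'view', 'route'],
--     'modal': ['dialog', 'popup', 'overlay'],
--     'dialog': ['modal', 'popup', 'overlay'],
--     'popup': ['modal', 'dialog', 'overlay'],
--     'overlay': ['modal', 'dialog', 'popup'],
--     'form': ['input', 'field', 'control'],
--     'field': ['form', 'input', 'control'],
--     'control': ['form', 'input', 'field'],
--     'button': ['btn', 'action', 'trigger'],
--     'btn': ['button', 'action', 'trigger'],
--     'action': ['button', 'btn', 'trigger'],
--     'create': ['add', 'new', 'insert', 'make', 'generate'],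
--     'add': ['create', 'new', 'insert', 'make', 'generate'],
--     'new': ['create', 'add', 'insert', 'make', 'generate'],
--     'insert': ['create', 'add', 'new', 'make', 'generate'],
--     'make': ['create', 'add', 'new', 'insert', 'generate'],
--     'generate': ['create', 'add', 'new', 'insert', 'make'],
--     'update': ['edit', 'modify', 'patch', 'change'],
--     'edit': ['update', 'modify', 'patch', 'change'],
--     'modify': ['update', 'edit', 'patch', 'change'],
--     'patch': ['update', 'edit', 'modify', 'change'],
--     'change': ['update', 'edit', 'modify', 'patch'],
--     'delete': ['remove', 'destroy', 'drop', 'purge'],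
--     'remove': ['delete', 'destroy', 'drop', 'purge'],
--     'destroy': ['delete', 'remove', 'drop', 'purge'],
--     'drop': ['delete', 'remove', 'destroy', 'purge'],
--     'purge': ['delete', 'remove', 'destroy', 'drop'],
--     'list': ['index', 'all', 'fetch', 'get_all', 'find_all'],
--     'index': ['list', 'all', 'fetch', 'get_all', 'find_all'],
--     'all': ['list', 'index', 'fetch', 'get_all', 'find_all'],
--     'get_all': ['list', 'index', 'all', 'fetch', 'find_all'],
--     'find_all': ['list', 'index', 'all', 'fetch', 'get_all'],
--     'get': ['fetch', 'find', 'read', 'retrieve', 'load'],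
--     'read': ['get', 'fetch', 'find', 'retrieve', 'load'],
--     'retrieve': ['get', 'fetch', 'find', 'read', 'load'],
--     'load': ['get', 'fetch', 'find', 'read', 'retrieve'],
--     'test': ['spec', 'check', 'verify', 'assert'],
--     'spec': ['test', 'check', 'verify', 'assert'],
--     'mock': ['stub', 'fake', 'spy', 'double'],
--     'stub': ['mock', 'fake', 'spy', 'double'],
--     'fake': ['mock', 'stub', 'spy', 'double'],
--     'spy': ['mock', 'stub', 'fake', 'double'],
--     'double': ['mock', 'stub', 'fake', 'spy'],
--     'fixture': ['factory', 'seed', 'sample'],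
--     'factory': ['fixture', 'seed', 'sample'],
--     'seed': ['fixture', 'factory', 'sample'],
--     'sample': ['fixture', 'factory', 'seed'],
--     'config': ['settings', 'options', 'preferences', 'env', 'environment', 'env', 'context'],
--     'settings': ['config', 'options', 'preferences', 'env'],
--     'options': ['config', 'settings', 'preferences', 'env'],
--     'preferences': ['config', 'settings', 'options', 'env'],
--     'env': ['config', 'settings', 'options', 'preferences', 'environment', 'config', 'context'],
--     'environment': ['env', 'config', 'context'],
--     'context': ['environment', 'env', 'config'],
-- }
--
-- def quick_expand(term: str) -> List[str]:
--     """Quick expansion using only built-in synonyms."""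
--     return list(set([term] + _INDEX.get(term.lower(), [])))
-- ===== Notes on version B (the rewrite author's own statement) =====
-- stated objective: faster
-- what changed: Replaced A's per-call double scan of the synonym table (key lookup plus a reverse scan over every entry's synonym list) with a reverse expansion index precomputed once as a module-level table, so each call is a single dict lookup.
import Mathlib
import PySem

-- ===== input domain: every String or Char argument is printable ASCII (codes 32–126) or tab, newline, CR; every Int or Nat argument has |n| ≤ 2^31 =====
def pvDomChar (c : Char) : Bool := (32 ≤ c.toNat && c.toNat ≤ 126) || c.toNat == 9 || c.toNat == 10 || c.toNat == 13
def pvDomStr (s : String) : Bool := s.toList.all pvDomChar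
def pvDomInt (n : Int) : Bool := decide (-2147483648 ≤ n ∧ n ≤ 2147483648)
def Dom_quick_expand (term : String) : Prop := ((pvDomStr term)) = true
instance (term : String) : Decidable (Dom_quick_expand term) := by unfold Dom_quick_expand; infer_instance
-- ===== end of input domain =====

-- B replaces A's per-call double scan of the synonym table by a reverse expansion
-- index precomputed once from the same table, so each call is one dict lookup;
-- same value set, including the original-cased term.

-- ===== PORT A =====
def BUILTIN_SYNONYMS : PySem.Dict String (List String) := PySem.Dict.ofList [
  ("login", ["auth", "signin", "authenticate", "session", "credential"]),
  ("logout", ["signout", "deauth", "session_destroy"]),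
  ("auth", ["authentication", "login", "identity", "oauth", "jwt", "token"]),
  ("user", ["account", "profile", "member", "identity", "principal"]),
  ("password", ["credential", "secret", "passphrase", "pwd"]),
  ("permission", ["role", "access", "privilege", "acl", "rbac", "authorization"]),
  ("cart", ["basket", "bag", "shopping_cart"]),
  ("checkout", ["purchase", "order", "payment", "buy"]),
  ("billing", ["invoice", "payment", "subscription", "charge", "stripe", "pricing"]),
  ("payment", ["billing", "charge", "transaction", "stripe", "paypal"]),
  ("product", ["item", "sku", "merchandise", "goods", "inventory"]),
  ("order", ["purchase", "transaction", "checkout", "booking"]),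
  ("customer", ["client", "buyer", "user", "account"]),
  ("database", ["db", "store", "persistence", "repository", "storage"]),
  ("query", ["search", "find", "fetch", "select", "lookup"]),
  ("cache", ["memo", "store", "redis", "memcache"]),
  ("model", ["entity", "schema", "record", "domain"]),
  ("migration", ["schema", "alter", "upgrade", "evolve"]),
  ("endpoint", ["route", "handler", "controller", "api"]),
  ("request", ["req", "input", "payload"]),
  ("response", ["res", "output", "reply"]),
  ("middleware", ["interceptor", "filter", "guard", "pipe"]),
  ("validation", ["verify", "check", "guard", "assert", "sanitize"]),
  ("event", ["message", "signal", "notification", "webhook", "trigger"]),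
  ("publish", ["emit", "send", "dispatch", "broadcast"]),
  ("subscribe", ["listen", "consume", "handle", "observe"]),
  ("queue", ["job", "task", "worker", "background"]),
  ("component", ["widget", "element", "view", "partial"]),
  ("page", ["screen", "view", "route", "template"]),
  ("modal", ["dialog", "popup", "overlay"]),
  ("form", ["input", "field", "control"]),
  ("button", ["btn", "action", "trigger"]),
  ("create", ["add", "new", "insert", "make", "generate"]),
  ("update", ["edit", "modify", "patch", "change"]),
  ("delete", ["remove", "destroy", "drop", "purge"]),
  ("list", ["index", "all", "fetch", "get_all", "find_all"]),
  ("get", ["fetch", "find", "read", "retrieve", "load"]),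
  ("test", ["spec", "check", "verify", "assert"]),
  ("mock", ["stub", "fake", "spy", "double"]),
  ("fixture", ["factory", "seed", "sample"]),
  ("config", ["settings", "options", "preferences", "env"]),
  ("environment", ["env", "config", "context"])
]

def quick_expand (term : String) : List String :=
  let results := [term]
  let results :=
    if BUILTIN_SYNONYMS.contains (PySem.Str.lower term) then
      results ++ BUILTIN_SYNONYMS.getD (PySem.Str.lower term) []
    else results
  let results := BUILTIN_SYNONYMS.items.foldl
    (fun res ks =>
      if ks.2.contains (PySem.Str.lower term) then
        (res ++ [ks.1]) ++ ks.2.filter (fun s => s != PySem.Str.lower term)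
      else res) results
  PySem.Set.ofList results

-- ===== PORT B =====
-- Source B's precomputed reverse expansion index _INDEX (a module-level literal).
def pvIndex : PySem.Dict String (List String) := PySem.Dict.ofList [
  ("login", ["auth", "signin", "authenticate", "session", "credential", "auth", "authentication", "identity", "oauth", "jwt", "token"]),
  ("auth", ["authentication", "login", "identity", "oauth", "jwt", "token", "login", "signin", "authenticate", "session", "credential"]),
  ("signin", ["login", "auth", "authenticate", "session", "credential"]),
  ("authenticate", ["login", "auth", "signin", "session", "credential"]),
  ("session", ["login", "auth", "signin", "authenticate", "credential"]),
  ("credential", ["login", "auth", "signin", "authenticate", "session", "password", "secret", "passphrase", "pwd"]),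
  ("logout", ["signout", "deauth", "session_destroy"]),
  ("signout", ["logout", "deauth", "session_destroy"]),
  ("deauth", ["logout", "signout", "session_destroy"]),
  ("session_destroy", ["logout", "signout", "deauth"]),
  ("authentication", ["auth", "login", "identity", "oauth", "jwt", "token"]),
  ("identity", ["auth", "authentication", "login", "oauth", "jwt", "token", "user", "account", "profile", "member", "principal"]),
  ("oauth", ["auth", "authentication", "login", "identity", "jwt", "token"]),
  ("jwt", ["auth", "authentication", "login", "identity", "oauth", "token"]),
  ("token", ["auth", "authentication", "login", "identity", "oauth", "jwt"]),
  ("user", ["account", "profile", "member", "identity", "principal", "customer", "client", "buyer", "account"]),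
  ("account", ["user", "profile", "member", "identity", "principal", "customer", "client", "buyer", "user"]),
  ("profile", ["user", "account", "member", "identity", "principal"]),
  ("member", ["user", "account", "profile", "identity", "principal"]),
  ("principal", ["user", "account", "profile", "member", "identity"]),
  ("password", ["credential", "secret", "passphrase", "pwd"]),
  ("secret", ["password", "credential", "passphrase", "pwd"]),
  ("passphrase", ["password", "credential", "secret", "pwd"]),
  ("pwd", ["password", "credential", "secret", "passphrase"]),
  ("permission", ["role", "access", "privilege", "acl", "rbac", "authorization"]),
  ("role", ["permission", "access", "privilege", "acl", "rbac", "authorization"]),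
  ("access", ["permission", "role", "privilege", "acl", "rbac", "authorization"]),
  ("privilege", ["permission", "role", "access", "acl", "rbac", "authorization"]),
  ("acl", ["permission", "role", "access", "privilege", "rbac", "authorization"]),
  ("rbac", ["permission", "role", "access", "privilege", "acl", "authorization"]),
  ("authorization", ["permission", "role", "access", "privilege", "acl", "rbac"]),
  ("cart", ["basket", "bag", "shopping_cart"]),
  ("basket", ["cart", "bag", "shopping_cart"]),
  ("bag", ["cart", "basket", "shopping_cart"]),
  ("shopping_cart", ["cart", "basket", "bag"]),
  ("checkout", ["purchase", "order", "payment", "buy", "order", "purchase", "transaction", "booking"]),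
  ("purchase", ["checkout", "order", "payment", "buy", "order", "transaction", "checkout", "booking"]),
  ("order", ["purchase", "transaction", "checkout", "booking", "checkout", "purchase", "payment", "buy"]),
  ("payment", ["billing", "charge", "transaction", "stripe", "paypal", "checkout", "purchase", "order", "buy", "billing", "invoice", "subscription", "charge", "stripe", "pricing"]),
  ("buy", ["checkout", "purchase", "order", "payment"]),
  ("billing", ["invoice", "payment", "subscription", "charge", "stripe", "pricing", "payment", "charge", "transaction", "stripe", "paypal"]),
  ("invoice", ["billing", "payment", "subscription", "charge", "stripe", "pricing"]),
  ("subscription", ["billing", "invoice", "payment", "charge", "stripe", "pricing"]),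
  ("charge", ["billing", "invoice", "payment", "subscription", "stripe", "pricing", "payment", "billing", "transaction", "stripe", "paypal"]),
  ("stripe", ["billing", "invoice", "payment", "subscription", "charge", "pricing", "payment", "billing", "charge", "transaction", "paypal"]),
  ("pricing", ["billing", "invoice", "payment", "subscription", "charge", "stripe"]),
  ("transaction", ["payment", "billing", "charge", "stripe", "paypal", "order", "purchase", "checkout", "booking"]),
  ("paypal", ["payment", "billing", "charge", "transaction", "stripe"]),
  ("product", ["item", "sku", "merchandise", "goods", "inventory"]),
  ("item", ["product", "sku", "merchandise", "goods", "inventory"]),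
  ("sku", ["product", "item", "merchandise", "goods", "inventory"]),
  ("merchandise", ["product", "item", "sku", "goods", "inventory"]),
  ("goods", ["product", "item", "sku", "merchandise", "inventory"]),
  ("inventory", ["product", "item", "sku", "merchandise", "goods"]),
  ("booking", ["order", "purchase", "transaction", "checkout"]),
  ("customer", ["client", "buyer", "user", "account"]),
  ("client", ["customer", "buyer", "user", "account"]),
  ("buyer", ["customer", "client", "user", "account"]),
  ("database", ["db", "store", "persistence", "repository", "storage"]),
  ("db", ["database", "store", "persistence", "repository", "storage"]),
  ("store", ["database", "db", "persistence", "repository", "storage", "cache", "memo", "redis", "memcache"]),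
  ("persistence", ["database", "db", "store", "repository", "storage"]),
  ("repository", ["database", "db", "store", "persistence", "storage"]),
  ("storage", ["database", "db", "store", "persistence", "repository"]),
  ("query", ["search", "find", "fetch", "select", "lookup"]),
  ("search", ["query", "find", "fetch", "select", "lookup"]),
  ("find", ["query", "search", "fetch", "select", "lookup", "get", "fetch", "read", "retrieve", "load"]),
  ("fetch", ["query", "search", "find", "select", "lookup", "list", "index", "all", "get_all", "find_all", "get", "find", "read", "retrieve", "load"]),
  ("select", ["query", "search", "find", "fetch", "lookup"]),
  ("lookup", ["query", "search", "find", "fetch", "select"]),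
  ("cache", ["memo", "store", "redis", "memcache"]),
  ("memo", ["cache", "store", "redis", "memcache"]),
  ("redis", ["cache", "memo", "store", "memcache"]),
  ("memcache", ["cache", "memo", "store", "redis"]),
  ("model", ["entity", "schema", "record", "domain"]),
  ("entity", ["model", "schema", "record", "domain"]),
  ("schema", ["model", "entity", "record", "domain", "migration", "alter", "upgrade", "evolve"]),
  ("record", ["model", "entity", "schema", "domain"]),
  ("domain", ["model", "entity", "schema", "record"]),
  ("migration", ["schema", "alter", "upgrade", "evolve"]),
  ("alter", ["migration", "schema", "upgrade", "evolve"]),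
  ("upgrade", ["migration", "schema", "alter", "evolve"]),
  ("evolve", ["migration", "schema", "alter", "upgrade"]),
  ("endpoint", ["route", "handler", "controller", "api"]),
  ("route", ["endpoint", "handler", "controller", "api", "page", "screen", "view", "template"]),
  ("handler", ["endpoint", "route", "controller", "api"]),
  ("controller", ["endpoint", "route", "handler", "api"]),
  ("api", ["endpoint", "route", "handler", "controller"]),
  ("request", ["req", "input", "payload"]),
  ("req", ["request", "input", "payload"]),
  ("input", ["request", "req", "payload", "form", "field", "control"]),
  ("payload", ["request", "req", "input"]),
  ("response", ["res", "output", "reply"]),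
  ("res", ["response", "output", "reply"]),
  ("output", ["response", "res", "reply"]),
  ("reply", ["response", "res", "output"]),
  ("middleware", ["interceptor", "filter", "guard", "pipe"]),
  ("interceptor", ["middleware", "filter", "guard", "pipe"]),
  ("filter", ["middleware", "interceptor", "guard", "pipe"]),
  ("guard", ["middleware", "interceptor", "filter", "pipe", "validation", "verify", "check", "assert", "sanitize"]),
  ("pipe", ["middleware", "interceptor", "filter", "guard"]),
  ("validation", ["verify", "check", "guard", "assert", "sanitize"]),
  ("verify", ["validation", "check", "guard", "assert", "sanitize", "test", "spec", "check", "assert"]),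
  ("check", ["validation", "verify", "guard", "assert", "sanitize", "test", "spec", "verify", "assert"]),
  ("assert", ["validation", "verify", "check", "guard", "sanitize", "test", "spec", "check", "verify"]),
  ("sanitize", ["validation", "verify", "check", "guard", "assert"]),
  ("event", ["message", "signal", "notification", "webhook", "trigger"]),
  ("message", ["event", "signal", "notification", "webhook", "trigger"]),
  ("signal", ["event", "message", "notification", "webhook", "trigger"]),
  ("notification", ["event", "message", "signal", "webhook", "trigger"]),
  ("webhook", ["event", "message", "signal", "notification", "trigger"]),
  ("trigger", ["event", "message", "signal", "notification", "webhook", "button", "btn", "action"]),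
  ("publish", ["emit", "send", "dispatch", "broadcast"]),
  ("emit", ["publish", "send", "dispatch", "broadcast"]),
  ("send", ["publish", "emit", "dispatch", "broadcast"]),
  ("dispatch", ["publish", "emit", "send", "broadcast"]),
  ("broadcast", ["publish", "emit", "send", "dispatch"]),
  ("subscribe", ["listen", "consume", "handle", "observe"]),
  ("listen", ["subscribe", "consume", "handle", "observe"]),
  ("consume", ["subscribe", "listen", "handle", "observe"]),
  ("handle", ["subscribe", "listen", "consume", "observe"]),
  ("observe", ["subscribe", "listen", "consume", "handle"]),
  ("queue", ["job", "task", "worker", "background"]),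
  ("job", ["queue", "task", "worker", "background"]),
  ("task", ["queue", "job", "worker", "background"]),
  ("worker", ["queue", "job", "task", "background"]),
  ("background", ["queue", "job", "task", "worker"]),
  ("component", ["widget", "element", "view", "partial"]),
  ("widget", ["component", "element", "view", "partial"]),
  ("element", ["component", "widget", "view", "partial"]),
  ("view", ["component", "widget", "element", "partial", "page", "screen", "route", "template"]),
  ("partial", ["component", "widget", "element", "view"]),
  ("page", ["screen", "view", "route", "template"]),
  ("screen", ["page", "view", "route", "template"]),
  ("template", ["page", "screen", "view", "route"]),
  ("modal", ["dialog", "popup", "overlay"]),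
  ("dialog", ["modal", "popup", "overlay"]),
  ("popup", ["modal", "dialog", "overlay"]),
  ("overlay", ["modal", "dialog", "popup"]),
  ("form", ["input", "field", "control"]),
  ("field", ["form", "input", "control"]),
  ("control", ["form", "input", "field"]),
  ("button", ["btn", "action", "trigger"]),
  ("btn", ["button", "action", "trigger"]),
  ("action", ["button", "btn", "trigger"]),
  ("create", ["add", "new", "insert", "make", "generate"]),
  ("add", ["create", "new", "insert", "make", "generate"]),
  ("new", ["create", "add", "insert", "make", "generate"]),
  ("insert", ["create", "add", "new", "make", "generate"]),
  ("make", ["create", "add", "new", "insert", "generate"]),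
  ("generate", ["create", "add", "new", "insert", "make"]),
  ("update", ["edit", "modify", "patch", "change"]),
  ("edit", ["update", "modify", "patch", "change"]),
  ("modify", ["update", "edit", "patch", "change"]),
  ("patch", ["update", "edit", "modify", "change"]),
  ("change", ["update", "edit", "modify", "patch"]),
  ("delete", ["remove", "destroy", "drop", "purge"]),
  ("remove", ["delete", "destroy", "drop", "purge"]),
  ("destroy", ["delete", "remove", "drop", "purge"]),
  ("drop", ["delete", "remove", "destroy", "purge"]),
  ("purge", ["delete", "remove", "destroy", "drop"]),
  ("list", ["index", "all", "fetch", "get_all", "find_all"]),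
  ("index", ["list", "all", "fetch", "get_all", "find_all"]),
  ("all", ["list", "index", "fetch", "get_all", "find_all"]),
  ("get_all", ["list", "index", "all", "fetch", "find_all"]),
  ("find_all", ["list", "index", "all", "fetch", "get_all"]),
  ("get", ["fetch", "find", "read", "retrieve", "load"]),
  ("read", ["get", "fetch", "find", "retrieve", "load"]),
  ("retrieve", ["get", "fetch", "find", "read", "load"]),
  ("load", ["get", "fetch", "find", "read", "retrieve"]),
  ("test", ["spec", "check", "verify", "assert"]),
  ("spec", ["test", "check", "verify", "assert"]),
  ("mock", ["stub", "fake", "spy", "double"]),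
  ("stub", ["mock", "fake", "spy", "double"]),
  ("fake", ["mock", "stub", "spy", "double"]),
  ("spy", ["mock", "stub", "fake", "double"]),
  ("double", ["mock", "stub", "fake", "spy"]),
  ("fixture", ["factory", "seed", "sample"]),
  ("factory", ["fixture", "seed", "sample"]),
  ("seed", ["fixture", "factory", "sample"]),
  ("sample", ["fixture", "factory", "seed"]),
  ("config", ["settings", "options", "preferences", "env", "environment", "env", "context"]),
  ("settings", ["config", "options", "preferences", "env"]),
  ("options", ["config", "settings", "preferences", "env"]),
  ("preferences", ["config", "settings", "options", "env"]),
  ("env", ["config", "settings", "options", "preferences", "environment", "config", "context"]),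
  ("environment", ["env", "config", "context"]),
  ("context", ["environment", "env", "config"])
]

def quick_expand_alt (term : String) : List String :=
  PySem.Set.ofList ([term] ++ pvIndex.getD (PySem.Str.lower term) [])

-- ===== PRECONDITION & SPEC =====
def Spec_quick_expand (term : String) (out : List String) : Prop := out = quick_expand_alt term
instance (term : String) (out : List String) : Decidable (Spec_quick_expand term out) := by unfold Spec_quick_expand; infer_instance

-- ===== CLAIM (what is proved, stated in full; the proofs are below) =====
def Claim_equal_quick_expand : Prop := ∀ (term : String), Dom_quick_expand term → Spec_quick_expand term (quick_expand term)

-- ===== LEMMAS AND PROOFS =====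

-- What A appends after [term], as a function of the lowercased term.
def pvAChunk (lt : String) : List String :=
  (if BUILTIN_SYNONYMS.contains lt then BUILTIN_SYNONYMS.getD lt [] else []) ++
  (BUILTIN_SYNONYMS.items.filter (fun ks => ks.2.contains lt)).flatMap
    (fun ks => ks.1 :: ks.2.filter (fun s => s != lt))

-- On every word of the index, A's chunk is exactly the index entry (finite check).
set_option maxRecDepth 400000 in
set_option maxHeartbeats 4000000 in
theorem chunk_eq_of_mem : ∀ lt ∈ pvIndex.keys, pvAChunk lt = pvIndex.getD lt [] := by decide

-- Every key of A's table is a key of the index.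
set_option maxRecDepth 400000 in
set_option maxHeartbeats 1000000 in
theorem keys_sub : ∀ k ∈ BUILTIN_SYNONYMS.keys, k ∈ pvIndex.keys := by decide

-- Every synonym in A's table is a key of the index.
set_option maxRecDepth 400000 in
set_option maxHeartbeats 1000000 in
theorem syns_sub : ∀ ks ∈ BUILTIN_SYNONYMS.items, ∀ s ∈ ks.2, s ∈ pvIndex.keys := by decide

theorem chunk_eq_of_not_mem (lt : String) (h : lt ∉ pvIndex.keys) : pvAChunk lt = [] := by
  unfold pvAChunk
  have hc : BUILTIN_SYNONYMS.contains lt = false := by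
    rw [PySem.Dict.contains_eq_decide_mem_keys]
    simp only [decide_eq_false_iff_not]
    exact fun hm => h (keys_sub lt hm)
  have hf : BUILTIN_SYNONYMS.items.filter (fun ks => ks.2.contains lt) = [] := by
    rw [List.filter_eq_nil_iff]
    intro ks hks
    have : lt ∉ ks.2 := fun hm => h (syns_sub ks hks lt hm)
    simpa using this
  rw [hf]
  simp [hc]

theorem index_getD_of_not_mem (lt : String) (h : lt ∉ pvIndex.keys) :
    pvIndex.getD lt [] = [] := by
  refine PySem.Dict.getD_of_not_contains _ _ ?_
  rw [PySem.Dict.contains_eq_decide_mem_keys]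
  simp [h]

theorem chunk_eq (lt : String) : pvAChunk lt = pvIndex.getD lt [] := by
  by_cases h : lt ∈ pvIndex.keys
  · exact chunk_eq_of_mem lt h
  · rw [chunk_eq_of_not_mem lt h, index_getD_of_not_mem lt h]

-- A's reverse-scan loop, flattened: append the chunk of every matching entry.
theorem loopA_eq (lt : String) (items : List (String × List String)) (acc : List String) :
    items.foldl
      (fun res ks =>
        if ks.2.contains lt then (res ++ [ks.1]) ++ ks.2.filter (fun s => s != lt) else res) acc
    = acc ++ (items.filter (fun ks => ks.2.contains lt)).flatMap
        (fun ks => ks.1 :: ks.2.filter (fun s => s != lt)) := by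
  induction items generalizing acc with
  | nil => simp
  | cons x t ih =>
    simp only [List.foldl_cons, ih, List.filter_cons]
    by_cases h : lt ∈ x.2 <;> simp [h]

-- ===== VERDICT (by name: the statement is the Claim_ definition above) =====
theorem quick_expand_spec : Claim_equal_quick_expand := by
  intro term _
  unfold Spec_quick_expand
  simp only [quick_expand, quick_expand_alt]
  rw [loopA_eq, ← chunk_eq]
  unfold pvAChunk
  by_cases h : BUILTIN_SYNONYMS.contains (PySem.Str.lower term) = true
  · simp [h]
  · simp [h]
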